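-- pv_equiv track=rewrite | github.com/roa5108/Algorithm | 프로그래머스/1/155652. 둘만의 암호/둘만의 암호.py | solution
-- ===== SOURCE A (Python) =====
-- def solution(s, skip, index):
--     answer = ''
--     for i in s:
--         temp=i
--         move=0
--
--         while move<index:
--             temp=chr(ord(temp)+1)
--             if temp>'z':
--                 temp='a'
--             if temp in skip:
--                 continue
--             move+=1
--         answer+=temp
--
--     return answer
-- ===== SOURCE B (Python) =====
-- def solution(s, skip, index):
--     skipcodes = set(ord(c) for c in skip)
--     cycle = [k for k in range(97, 123) if k not in skipcodes]
--     out = []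
--     for ch in s:
--         if index <= 0:
--             out.append(ch)
--             continue
--         prefix = [k for k in range(ord(ch) + 1, 123) if k not in skipcodes]
--         if index <= len(prefix):
--             out.append(chr(prefix[index - 1]))
--         else:
--             out.append(chr(cycle[(index - len(prefix) - 1) % len(cycle)]))
--     return ''.join(out)
-- ===== Notes on version B (the rewrite author's own statement) =====
-- stated objective: faster
-- what changed: A advances each character one step at a time (O(index) while-loop iterations per character); B precomputes the non-skipped codes and jumps directly: the answer is the index-th valid successor, read off a filtered prefix list or the valid-letter cycle via (index - len(prefix) - 1) % len(cycle).
import Mathlib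
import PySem

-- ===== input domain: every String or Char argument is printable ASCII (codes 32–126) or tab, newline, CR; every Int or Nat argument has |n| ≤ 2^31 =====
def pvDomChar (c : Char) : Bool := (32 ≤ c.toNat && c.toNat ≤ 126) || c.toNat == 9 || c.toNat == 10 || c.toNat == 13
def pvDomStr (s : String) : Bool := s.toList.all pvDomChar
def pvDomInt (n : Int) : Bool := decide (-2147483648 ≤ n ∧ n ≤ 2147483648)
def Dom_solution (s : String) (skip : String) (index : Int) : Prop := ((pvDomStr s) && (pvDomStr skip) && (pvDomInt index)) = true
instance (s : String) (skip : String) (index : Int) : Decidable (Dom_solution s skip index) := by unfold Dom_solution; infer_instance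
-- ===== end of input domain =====

-- B replaces A's step-by-step character advancing with direct indexing into the
-- filtered successor list / the valid-letter cycle (one modulus instead of `index` loop steps).

-- ===== PORT A =====
-- 'temp in skip' (temp a 1-char string) is PySem.Str.isIn; the unbounded while loop is
-- rendered with fuel 150 * index.toNat, which is sufficient on Pre_solution (proved below).
def solutionStep (t : Char) : Char :=
  let t' := Char.ofNat (t.toNat + 1)
  if 'z' < t' then 'a' else t'

def solutionLoop (skip : String) (index : Int) : Nat → Char → Int → Char
  | 0, temp, _ => temp
  | fuel + 1, temp, move =>
    if move < index then
      let t' := solutionStep temp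
      if PySem.Str.isIn (String.ofList [t']) skip then solutionLoop skip index fuel t' move
      else solutionLoop skip index fuel t' (move + 1)
    else temp

def solution (s : String) (skip : String) (index : Int) : String :=
  String.ofList (s.toList.foldl
    (fun answer i => answer ++ [solutionLoop skip index (150 * index.toNat) i 0]) [])

-- ===== PORT B =====
-- helpers shared by port B, Pre_solution and the proofs (codes are Python ord values)
def skipCodes (skip : String) : PySem.Set Int :=
  PySem.Set.ofList (skip.toList.map (fun c => (c.toNat : Int)))

def validAbove (skip : String) (x : Int) : List Int :=
  (PySem.List.pyRange (x + 1) 123).filter (fun k => !(PySem.Set.contains (skipCodes skip) k))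

def validCycle (skip : String) : List Int := validAbove skip 96

def solution_alt (s : String) (skip : String) (index : Int) : String :=
  let cycle := validCycle skip
  String.ofList (s.toList.map (fun ch =>
    if index ≤ 0 then ch
    else
      let pref := validAbove skip (ch.toNat : Int)
      if index ≤ (pref.length : Int) then
        Char.ofNat (PySem.List.pyGetD pref (index - 1) 0).toNat
      else
        Char.ofNat (PySem.List.pyGetD cycle
          (PySem.Int.mod (index - (pref.length : Int) - 1) (cycle.length : Int)) 0).toNat))

-- ===== PRECONDITION & SPEC =====
-- Pre_solution excludes exactly the inputs on which A never returns (its while loop diverges):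
-- index > 0, no lowercase letter survives skip, and some character of s has fewer than index
-- non-skipped successors up to 'z'; on every input A returns, Pre_solution holds.
def Pre_solution (s : String) (skip : String) (index : Int) : Prop :=
  index ≤ 0 ∨ validCycle skip ≠ [] ∨
    ∀ c ∈ s.toList, index ≤ ((validAbove skip (c.toNat : Int)).length : Int)

instance (s : String) (skip : String) (index : Int) : Decidable (Pre_solution s skip index) := by
  unfold Pre_solution; infer_instance

def pvWitness_solution : String × String × Int := ("ab", "bc", 5)

def Spec_solution (s : String) (skip : String) (index : Int) (out : String) : Prop := out = solution_alt s skip index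
instance (s : String) (skip : String) (index : Int) (out : String) : Decidable (Spec_solution s skip index out) := by unfold Spec_solution; infer_instance

-- ===== CLAIM (what is proved, stated in full; the proofs are below) =====
def Claim_equal_solution : Prop := ∀ (s : String) (skip : String) (index : Int), Dom_solution s skip index → Pre_solution s skip index → Spec_solution s skip index (solution s skip index)

-- ===== LEMMAS AND PROOFS =====

-- proof-side model of A's loop over Int character codes
def stepI (x : Int) : Int := if 122 < x + 1 then 97 else x + 1

def loopI (skip : String) (index : Int) : Nat → Int → Int → Int
  | 0, x, _ => x
  | fuel + 1, x, move =>
    if move < index then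
      let x' := stepI x
      if (skipCodes skip).contains x' then loopI skip index fuel x' move
      else loopI skip index fuel x' (move + 1)
    else x

-- bounded search for the next non-skipped code, together with the number of raw steps
def goI (skip : String) : Nat → Int → Option (Int × Nat)
  | 0, _ => none
  | n + 1, x =>
    let x' := stepI x
    if (skipCodes skip).contains x' then (goI skip n x').map (fun p => (p.1, p.2 + 1))
    else some (x', 1)

-- closed form of the loop's result: d-th valid successor of x (d ≥ 1)
def formulaI (skip : String) (x : Int) (d : Nat) : Int :=
  if d ≤ (validAbove skip x).length then (validAbove skip x).getD (d - 1) 0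
  else (validCycle skip).getD ((d - (validAbove skip x).length - 1) % (validCycle skip).length) 0

lemma charOfNat_toNat (n : Nat) (h : n < 55296) : (Char.ofNat n).toNat = n := by
  have hv : n.isValidChar := Or.inl h
  simp [Char.ofNat, hv, Char.toNat, Char.ofNatAux]

lemma char_lt_iff (a b : Char) : a < b ↔ a.toNat < b.toNat := by
  rw [Char.lt_def, UInt32.lt_iff_toNat_lt]; rfl

lemma contains_bridge (skip : String) (t' : Char) :
    PySem.Str.isIn (String.ofList [t']) skip = (skipCodes skip).contains ((t'.toNat : Int)) := by
  have h1 : (PySem.Str.isIn (String.ofList [t']) skip = true) ↔ t' ∈ skip.toList := by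
    rw [PySem.Str.isIn_iff_infix]
    rw [String.toList_ofList]
    exact List.singleton_infix_iff t' skip.toList
  have h2 : ((skipCodes skip).contains ((t'.toNat : Int)) = true) ↔ t' ∈ skip.toList := by
    rw [PySem.Set.contains_iff]
    simp only [skipCodes, PySem.Set.mem_ofList, List.mem_map]
    constructor
    · rintro ⟨a, ha, he⟩
      have hat : a.toNat = t'.toNat := by exact_mod_cast he
      have : a = t' := by rw [← Char.ofNat_toNat a, hat, Char.ofNat_toNat]
      exact this ▸ ha
    · intro h; exact ⟨t', h, rfl⟩
  by_cases h : t' ∈ skip.toList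
  · rw [h1.mpr h, (h2.mpr h).symm]
  · have e1 : PySem.Str.isIn (String.ofList [t']) skip = false := by
      cases hb : PySem.Str.isIn (String.ofList [t']) skip
      · rfl
      · exact absurd (h1.mp hb) h
    have e2 : (skipCodes skip).contains ((t'.toNat : Int)) = false := by
      cases hb : (skipCodes skip).contains ((t'.toNat : Int))
      · rfl
      · exact absurd (h2.mp hb) h
    rw [e1, e2]

lemma step_code (t : Char) (h : t.toNat ≤ 126) :
    ((solutionStep t).toNat : Int) = stepI (t.toNat : Int) := by
  have hv : (Char.ofNat (t.toNat + 1)).toNat = t.toNat + 1 := charOfNat_toNat _ (by omega)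
  unfold solutionStep stepI
  simp only [char_lt_iff, hv]
  have hz : ('z').toNat = 122 := by decide
  rw [hz]
  split_ifs with h1 h2 h2
  · simp
  · omega
  · omega
  · simp [hv]

lemma stepI_bounds (x : Int) (h : 0 ≤ x) : 0 ≤ stepI x ∧ stepI x ≤ 122 := by
  unfold stepI; split <;> omega

lemma step_le (t : Char) (h : t.toNat ≤ 126) : (solutionStep t).toNat ≤ 122 := by
  have h1 := step_code t h
  have h2 := (stepI_bounds (t.toNat : Int) (by omega)).2
  omega

lemma loop_bridge (skip : String) (index : Int) :
    ∀ (fuel : Nat) (t : Char) (move : Int), t.toNat ≤ 126 →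
      solutionLoop skip index fuel t move
        = Char.ofNat (loopI skip index fuel (t.toNat : Int) move).toNat := by
  intro fuel
  induction fuel with
  | zero =>
    intro t move _
    simp [solutionLoop, loopI, Char.ofNat_toNat]
  | succ fuel ih =>
    intro t move ht
    by_cases hm : move < index
    · have hc : ((solutionStep t).toNat : Int) = stepI (t.toNat : Int) := step_code t ht
      have ht' : (solutionStep t).toNat ≤ 126 := by have := step_le t ht; omega
      simp only [solutionLoop, loopI, if_pos hm, contains_bridge, hc]
      split
      · rw [ih _ _ ht', hc]
      · rw [ih _ _ ht', hc]
    · simp [solutionLoop, loopI, hm, Char.ofNat_toNat]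

lemma va_nil (skip : String) (x : Int) (h : 122 ≤ x) : validAbove skip x = [] := by
  unfold validAbove
  rw [PySem.List.pyRange_one_eq_nil (by omega)]
  rfl

lemma va_unfold (skip : String) (x : Int) (h : x < 122) :
    validAbove skip x =
      if (skipCodes skip).contains (x + 1) then validAbove skip (x + 1)
      else (x + 1) :: validAbove skip (x + 1) := by
  unfold validAbove
  rw [PySem.List.pyRange_one_cons (by omega)]
  by_cases hc : (PySem.Set.contains (skipCodes skip) (x + 1)) = true
  · rw [if_pos hc]
    simp [List.filter_cons]
    exact (PySem.Set.contains_iff _ _).mp hc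
  · rw [if_neg hc]
    simp only [Bool.not_eq_true] at hc
    simp [List.filter_cons]
    intro hm
    rw [(PySem.Set.contains_iff _ _).mpr hm] at hc
    cases hc

lemma va_mem (skip : String) (x y : Int) (h : y ∈ validAbove skip x) :
    x + 1 ≤ y ∧ y < 123 ∧ (skipCodes skip).contains y = false := by
  unfold validAbove at h
  rw [List.mem_filter, PySem.List.mem_pyRange_one] at h
  refine ⟨h.1.1, h.1.2, ?_⟩
  simpa using h.2

lemma va_tail (skip : String) :
    ∀ (n : Nat) (x : Int), (122 - x).toNat ≤ n → ∀ (y : Int) (rest : List Int),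
      validAbove skip x = y :: rest → rest = validAbove skip y := by
  intro n
  induction n with
  | zero =>
    intro x hx y rest h
    rw [va_nil skip x (by omega)] at h
    cases h
  | succ n ih =>
    intro x hx y rest h
    by_cases hlt : x < 122
    · rw [va_unfold skip x hlt] at h
      split at h
      · exact ih (x + 1) (by omega) y rest h
      · cases h
        rfl
    · rw [va_nil skip x (by omega)] at h
      cases h

lemma go_G1 (skip : String) :
    ∀ (n : Nat) (x y : Int) (rest : List Int), validAbove skip x = y :: rest →
      (123 - x).toNat ≤ n → ∃ c, 1 ≤ c ∧ c ≤ n ∧ goI skip n x = some (y, c) := by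
  intro n
  induction n with
  | zero =>
    intro x y rest h hx
    rw [va_nil skip x (by omega)] at h
    cases h
  | succ n ih =>
    intro x y rest h hx
    have hlt : x < 122 := by
      by_contra hge
      rw [va_nil skip x (by omega)] at h
      cases h
    have hstep : stepI x = x + 1 := by unfold stepI; split <;> omega
    rw [va_unfold skip x hlt] at h
    unfold goI
    simp only [hstep]
    split
    · rename_i hc
      rw [if_pos hc] at h
      obtain ⟨c, hc1, hc2, hc3⟩ := ih (x + 1) y rest h (by omega)
      exact ⟨c + 1, by omega, by omega, by rw [hc3]; rfl⟩
    · rename_i hc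
      rw [if_neg hc] at h
      cases h
      exact ⟨1, le_refl _, by omega, rfl⟩

lemma go_wrap (skip : String) :
    ∀ (n : Nat) (x : Int), validAbove skip x = [] → ∀ (q : Int) (ct : List Int),
      validCycle skip = q :: ct → (123 - x).toNat + 27 ≤ n →
      ∃ c, 1 ≤ c ∧ c ≤ n ∧ goI skip n x = some (q, c) := by
  intro n
  induction n with
  | zero => intro x _ q ct _ h; omega
  | succ n ih =>
    intro x hva q ct hcy hn
    by_cases h122 : 122 ≤ x
    · have hstep : stepI x = 97 := by unfold stepI; split <;> omega
      unfold goI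
      simp only [hstep]
      by_cases hc : (skipCodes skip).contains (97 : Int)
      · have h96 : validCycle skip = validAbove skip 97 := by
          unfold validCycle
          rw [va_unfold skip 96 (by omega)]
          rw [show (96:Int)+1 = 97 from by norm_num, if_pos hc]
        rw [h96] at hcy
        obtain ⟨c, hc1, hc2, hc3⟩ := go_G1 skip n 97 q ct hcy (by omega)
        rw [if_pos hc]
        exact ⟨c + 1, by omega, by omega, by rw [hc3]; rfl⟩
      · have h96 : validCycle skip = 97 :: validAbove skip 97 := by
          unfold validCycle
          rw [va_unfold skip 96 (by omega)]
          rw [show (96:Int)+1 = 97 from by norm_num, if_neg hc]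
        rw [hcy] at h96
        cases h96
        rw [if_neg hc]
        exact ⟨1, le_refl _, by omega, rfl⟩
    · have hlt : x < 122 := by omega
      have hstep : stepI x = x + 1 := by unfold stepI; split <;> omega
      rw [va_unfold skip x hlt] at hva
      unfold goI
      simp only [hstep]
      split
      · rename_i hc
        rw [if_pos hc] at hva
        obtain ⟨c, hc1, hc2, hc3⟩ := ih (x + 1) hva q ct hcy (by omega)
        exact ⟨c + 1, by omega, by omega, by rw [hc3]; rfl⟩
      · rename_i hc
        rw [if_neg hc] at hva
        cases hva

lemma loopI_succ (skip : String) (index : Int) (fuel : Nat) (x move : Int)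
    (hm : move < index) :
    loopI skip index (fuel + 1) x move =
      if (skipCodes skip).contains (stepI x) then loopI skip index fuel (stepI x) move
      else loopI skip index fuel (stepI x) (move + 1) := by
  conv_lhs => unfold loopI
  rw [if_pos hm]

lemma go_chunk (skip : String) (index : Int) :
    ∀ (n : Nat) (x y : Int) (c : Nat), goI skip n x = some (y, c) →
      ∀ (fuel : Nat) (move : Int), c ≤ fuel → move < index →
        loopI skip index fuel x move = loopI skip index (fuel - c) y (move + 1) := by
  intro n
  induction n with
  | zero => intro x y c h; cases h
  | succ n ih =>
    intro x y c h fuel move hcf hm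
    unfold goI at h
    simp only at h
    split at h
    · rename_i hc
      cases hgo : goI skip n (stepI x) with
      | none => rw [hgo] at h; cases h
      | some p =>
        rw [hgo] at h
        obtain ⟨y', c'⟩ := p
        simp only [Option.map_some] at h
        cases h
        obtain ⟨fuel, rfl⟩ : ∃ f, fuel = f + 1 := ⟨fuel - 1, by omega⟩
        rw [loopI_succ skip index fuel x move hm, if_pos hc,
          ih _ _ _ hgo fuel move (by omega) hm]
        congr 1
        omega
    · rename_i hc
      cases h
      obtain ⟨fuel, rfl⟩ : ∃ f, fuel = f + 1 := ⟨fuel - 1, by omega⟩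
      rw [loopI_succ skip index fuel x move hm, if_neg hc]
      congr 1

lemma loopI_stop (skip : String) (index : Int) (fuel : Nat) (x move : Int)
    (h : ¬ move < index) : loopI skip index fuel x move = x := by
  cases fuel <;> simp [loopI, h]

lemma formula_one_cons (skip : String) (x y : Int) (rest : List Int)
    (h : validAbove skip x = y :: rest) : formulaI skip x 1 = y := by
  unfold formulaI
  rw [h]
  simp

lemma formula_one_wrap (skip : String) (x q : Int) (ct : List Int)
    (h : validAbove skip x = []) (hc : validCycle skip = q :: ct) :
    formulaI skip x 1 = q := by
  unfold formulaI
  rw [h, hc]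
  simp

lemma formula_rec_cons (skip : String) (x y : Int) (rest : List Int) (d : Nat) (hd : 1 ≤ d)
    (h : validAbove skip x = y :: rest) : formulaI skip x (d + 1) = formulaI skip y d := by
  have hrest : rest = validAbove skip y := va_tail skip (122 - x).toNat x (le_refl _) y rest h
  unfold formulaI
  rw [h, ← hrest]
  obtain ⟨d', rfl⟩ : ∃ d', d = d' + 1 := ⟨d - 1, by omega⟩
  simp only [List.length_cons]
  by_cases hle : d' + 1 ≤ rest.length
  · rw [if_pos (by omega), if_pos hle]
    simp
  · rw [if_neg (by omega), if_neg hle]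
    congr 2
    omega

lemma formula_rec_wrap (skip : String) (x q : Int) (ct : List Int) (d : Nat) (hd : 1 ≤ d)
    (h : validAbove skip x = []) (hc : validCycle skip = q :: ct) :
    formulaI skip x (d + 1) = formulaI skip q d := by
  have hct : ct = validAbove skip q := va_tail skip 26 96 (by norm_num) q ct hc
  unfold formulaI
  rw [h, hc, ← hct]
  simp only [List.length_nil, List.length_cons, Nat.sub_zero]
  have hL : 0 < ct.length + 1 := by omega
  rw [if_neg (by omega)]
  by_cases hle : d ≤ ct.length
  · rw [if_pos hle]
    have hmod : (d + 1 - 1) % (ct.length + 1) = d := Nat.mod_eq_of_lt (by omega)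
    rw [hmod]
    obtain ⟨d', rfl⟩ : ∃ d', d = d' + 1 := ⟨d - 1, by omega⟩
    simp
  · rw [if_neg hle]
    congr 1
    have h1 : d + 1 - 1 = (d - (ct.length + 1)) + (ct.length + 1) := by omega
    have h2 : d - ct.length - 1 = d - (ct.length + 1) := by omega
    rw [h1, h2, Nat.add_mod_right]

lemma mainI (skip : String) (index : Int) :
    ∀ (d : Nat) (x : Int) (move : Int) (fuel : Nat), 0 ≤ x →
      index = move + (d : Int) → 1 ≤ d →
      ((d : Int) ≤ ((validAbove skip x).length : Int) ∨ validCycle skip ≠ []) →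
      150 * d ≤ fuel →
      loopI skip index fuel x move = formulaI skip x d := by
  intro d
  induction d with
  | zero => intro x move fuel _ _ h; omega
  | succ d ih =>
    intro x move fuel hx hidx hd hside hfuel
    have hm : move < index := by omega
    cases hva : validAbove skip x with
    | nil =>
      have hcy : validCycle skip ≠ [] := by
        rcases hside with h | h
        · rw [hva] at h; simp at h; omega
        · exact h
      obtain ⟨q, ct, hqc⟩ : ∃ q ct, validCycle skip = q :: ct := by
        cases hc : validCycle skip with
        | nil => exact absurd hc hcy
        | cons q ct => exact ⟨q, ct, rfl⟩
      obtain ⟨c, hc1, hc2, hc3⟩ := go_wrap skip 150 x hva q ct hqc (by omega)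
      rw [go_chunk skip index 150 x q c hc3 fuel move (by omega) hm]
      have hq0 : 0 ≤ q := by
        have : q ∈ validCycle skip := by rw [hqc]; exact List.mem_cons_self
        have := va_mem skip 96 q (by rwa [validCycle] at this)
        omega
      by_cases hd0 : d = 0
      · subst hd0
        rw [loopI_stop skip index _ q (move + 1) (by omega)]
        exact (formula_one_wrap skip x q ct hva hqc).symm
      · rw [ih q (move + 1) (fuel - c) hq0 (by omega) (by omega) (Or.inr hcy) (by omega)]
        exact (formula_rec_wrap skip x q ct d (by omega) hva hqc).symm
    | cons y rest =>
      obtain ⟨c, hc1, hc2, hc3⟩ := go_G1 skip 150 x y rest hva (by omega)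
      rw [go_chunk skip index 150 x y c hc3 fuel move (by omega) hm]
      have hy : x + 1 ≤ y ∧ y < 123 ∧ _ := va_mem skip x y (by rw [hva]; exact List.mem_cons_self)
      by_cases hd0 : d = 0
      · subst hd0
        rw [loopI_stop skip index _ y (move + 1) (by omega)]
        exact (formula_one_cons skip x y rest hva).symm
      · have hrest : rest = validAbove skip y := va_tail skip (122 - x).toNat x (le_refl _) y rest hva
        have hside' : ((d : Int) ≤ ((validAbove skip y).length : Int) ∨ validCycle skip ≠ []) := by
          rcases hside with h | h
          · left
            rw [hva] at h
            rw [← hrest]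
            simp only [List.length_cons] at h
            push_cast at h ⊢
            omega
          · exact Or.inr h
        rw [ih y (move + 1) (fuel - c) (by omega) (by omega) (by omega) hside' (by omega)]
        exact (formula_rec_cons skip x y rest d (by omega) hva).symm

-- ===== VERDICT (by name: the statement is the Claim_ definition above) =====
theorem solution_spec : Claim_equal_solution := by
  intro s skip index hDom hPre
  unfold Spec_solution solution solution_alt
  rw [PySem.List.foldl_append_singleton_eq_map]
  rw [List.nil_append]
  congr 1
  apply List.map_congr_left
  intro c hc
  have hcdom : c.toNat ≤ 126 := by
    have hs : pvDomStr s = true := by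
      unfold Dom_solution at hDom
      simp only [Bool.and_eq_true] at hDom
      exact hDom.1.1
    unfold pvDomStr at hs
    rw [List.all_eq_true] at hs
    have := hs c hc
    unfold pvDomChar at this
    simp only [Bool.or_eq_true, Bool.and_eq_true, decide_eq_true_eq, beq_iff_eq] at this
    omega
  by_cases hle : index ≤ 0
  · have h0 : index.toNat = 0 := Int.toNat_of_nonpos hle
    rw [h0]
    simp [solutionLoop, hle]
  · have hpos : 0 < index := by omega
    have hd1 : 1 ≤ index.toNat := by omega
    have hdix : (index.toNat : Int) = index := Int.toNat_of_nonneg (by omega)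
    have hside : ((index.toNat : Int) ≤ ((validAbove skip (c.toNat : Int)).length : Int) ∨ validCycle skip ≠ []) := by
      rcases hPre with h | h | h
      · omega
      · exact Or.inr h
      · left; rw [hdix]; exact h c hc
    rw [loop_bridge skip index _ c 0 hcdom]
    rw [mainI skip index index.toNat (c.toNat : Int) 0 (150 * index.toNat) (by omega)
      (by omega) hd1 hside (le_refl _)]
    rw [if_neg hle]
    simp only
    unfold formulaI
    by_cases h1 : index ≤ ((validAbove skip (c.toNat : Int)).length : Int)
    · rw [if_pos h1, if_pos (by omega)]
      have he : index - 1 = ((index.toNat - 1 : Nat) : Int) := by omega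
      rw [he, PySem.List.pyGetD_natCast]
    · rw [if_neg h1, if_neg (by omega)]
      have he : index - ((validAbove skip (c.toNat : Int)).length : Int) - 1
          = ((index.toNat - (validAbove skip (c.toNat : Int)).length - 1 : Nat) : Int) := by
        omega
      rw [he, PySem.Int.mod_natCast, PySem.List.pyGetD_natCast]
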